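-- pv_equiv track=rewrite | github.com/Francisca105/ist-leic-a | FP/Semana 4/f2.py | check
-- ===== SOURCE A (Python) =====
-- def check (numero, digito):
--     tuplo = ()
--     while numero > 0:
--         tuplo += (numero % 10, )
--         numero //= 10
--     tuplo = tuplo[::-1]
--
--     res = 0
--
--     for i in tuplo:
--         if i % digito == 0 or digito % i == 0:
--             res = res*10 + i
--
--     return res
-- ===== SOURCE B (Python) =====
-- def check(numero, digito):
--     if numero <= 0:
--         return 0
--     res = check(numero // 10, digito)
--     i = numero % 10
--     if i % digito == 0 or digito % i == 0:
--         res = res * 10 + i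
--     return res
-- ===== Notes on version B (the rewrite author's own statement) =====
-- stated objective: simpler
-- what changed: B replaces A's three-phase structure (build a digit tuple with a while-loop, reverse it, fold over it) by a single direct recursion on numero//10 that accumulates the result on the way back up.
import Mathlib
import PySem

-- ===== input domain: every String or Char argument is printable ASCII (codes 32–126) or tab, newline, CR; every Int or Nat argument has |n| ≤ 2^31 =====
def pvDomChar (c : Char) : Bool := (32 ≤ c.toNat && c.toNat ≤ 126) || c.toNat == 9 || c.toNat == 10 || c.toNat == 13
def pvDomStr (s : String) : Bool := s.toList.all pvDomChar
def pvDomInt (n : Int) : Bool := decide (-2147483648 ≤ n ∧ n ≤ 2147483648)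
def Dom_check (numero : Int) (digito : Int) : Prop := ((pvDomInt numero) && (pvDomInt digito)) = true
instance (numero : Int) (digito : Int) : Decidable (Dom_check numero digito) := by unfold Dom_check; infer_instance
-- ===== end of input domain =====

-- B replaces A's tuple-build / reverse / second loop by one direct recursion on the number (simpler decomposition, same values).

-- ===== PORT A =====
-- the while-loop: tuplo accumulates numero % 10 while numero > 0, numero //= 10
def check_loop (numero : Int) (tuplo : List Int) : List Int :=
  if numero > 0 then
    check_loop (PySem.Int.floordiv numero 10) (tuplo ++ [PySem.Int.mod numero 10])
  else tuplo
termination_by numero.toNat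
decreasing_by
  rw [PySem.Int.floordiv_eq_ediv_of_pos (by omega : (0:Int) < 10)]
  omega

def check (numero : Int) (digito : Int) : Int :=
  let tuplo := check_loop numero []
  -- tuplo[::-1]  (PySem.List.slice? xs none none (-1) = some xs.reverse, lemma slice?_none_none_neg_one)
  let tuplo := ((PySem.List.slice? tuplo none none (-1)).getD [])
  tuplo.foldl (fun res i =>
    if PySem.Int.mod i digito == 0 || PySem.Int.mod digito i == 0 then res * 10 + i else res) 0

-- ===== PORT B =====
def check_alt (numero : Int) (digito : Int) : Int :=
  if numero ≤ 0 then 0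
  else
    let res := check_alt (PySem.Int.floordiv numero 10) digito
    let i := PySem.Int.mod numero 10
    if PySem.Int.mod i digito == 0 || PySem.Int.mod digito i == 0 then res * 10 + i else res
termination_by numero.toNat
decreasing_by
  rw [PySem.Int.floordiv_eq_ediv_of_pos (by omega : (0:Int) < 10)]
  omega

-- ===== PRECONDITION & SPEC =====
-- Pre_ excludes exactly the inputs where A raises ZeroDivisionError (digito = 0 with at least
-- one digit to test); B raises there too.
def Pre_check (numero : Int) (digito : Int) : Prop := numero ≤ 0 ∨ digito ≠ 0
instance (numero : Int) (digito : Int) : Decidable (Pre_check numero digito) := by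
  unfold Pre_check; infer_instance
def pvWitness_check : Int × Int := (123, 2)

def Spec_check (numero : Int) (digito : Int) (out : Int) : Prop := out = check_alt numero digito
instance (numero : Int) (digito : Int) (out : Int) : Decidable (Spec_check numero digito out) := by
  unfold Spec_check; infer_instance

-- ===== CLAIM (what is proved, stated in full; the proofs are below) =====
def Claim_equal_check : Prop := ∀ (numero : Int) (digito : Int), Dom_check numero digito → Pre_check numero digito → Spec_check numero digito (check numero digito)

-- ===== LEMMAS AND PROOFS =====

theorem check_loop_neg (numero : Int) (h : ¬ numero > 0) (acc : List Int) :
    check_loop numero acc = acc := by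
  rw [check_loop]; simp [h]

theorem check_loop_pos (numero : Int) (h : numero > 0) (acc : List Int) :
    check_loop numero acc
      = check_loop (PySem.Int.floordiv numero 10) (acc ++ [PySem.Int.mod numero 10]) := by
  rw [check_loop]; simp [h]

theorem floordiv_toNat_lt (numero : Int) (hp : numero > 0) (k : Nat) (h : numero.toNat ≤ k + 1) :
    (PySem.Int.floordiv numero 10).toNat ≤ k := by
  rw [PySem.Int.floordiv_eq_ediv_of_pos (by omega : (0:Int) < 10)]; omega

theorem check_loop_acc (k : Nat) (numero : Int) (h : numero.toNat ≤ k) (acc : List Int) :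
    check_loop numero acc = acc ++ check_loop numero [] := by
  induction k generalizing numero acc with
  | zero =>
    rw [check_loop_neg _ (by omega), check_loop_neg _ (by omega)]; simp
  | succ k ih =>
    by_cases hp : numero > 0
    · have hlt := floordiv_toNat_lt numero hp k h
      rw [check_loop_pos _ hp, check_loop_pos _ hp, ih _ hlt,
        ih _ hlt ([] ++ [PySem.Int.mod numero 10])]
      simp
    · rw [check_loop_neg _ hp, check_loop_neg _ hp]; simp

theorem check_eq_alt_nonpos (numero : Int) (h : ¬ numero > 0) (digito : Int) :
    check numero digito = check_alt numero digito := by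
  rw [check_alt, if_pos (by omega : numero ≤ 0), check,
    check_loop_neg numero h, PySem.List.slice?_none_none_neg_one]
  simp only [Option.getD_some, List.reverse_nil, List.foldl_nil]

theorem check_eq_alt (k : Nat) (numero : Int) (h : numero.toNat ≤ k) (digito : Int) :
    check numero digito = check_alt numero digito := by
  induction k generalizing numero with
  | zero => exact check_eq_alt_nonpos numero (by omega) digito
  | succ k ih =>
    by_cases hp : numero > 0
    · have hlt := floordiv_toNat_lt numero hp k h
      have hrec := ih _ hlt
      rw [check, check_loop_pos _ hp, check_loop_acc k _ hlt,
        PySem.List.slice?_none_none_neg_one, check_alt, if_neg (by omega : ¬ numero ≤ 0)]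
      rw [check, PySem.List.slice?_none_none_neg_one] at hrec
      simp only [Option.getD_some, List.reverse_append, List.reverse_cons,
        List.reverse_nil, List.nil_append, List.foldl_append, List.foldl_cons,
        List.foldl_nil] at hrec ⊢
      rw [hrec]
    · exact check_eq_alt_nonpos numero hp digito

-- ===== VERDICT (by name: the statement is the Claim_ definition above) =====
theorem check_spec : Claim_equal_check := by
  intro numero digito _ _
  unfold Spec_check
  exact check_eq_alt numero.toNat numero le_rfl digito
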